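-- pv_equiv track=rewrite | github.com/waithope/codewars | CodeWars.py | scramble_v2
-- ===== SOURCE A (Python) =====
-- def scramble_v2(s1, s2):
--   s1_dict = {}
--   s2_dict = {}
--   for char in s1:
--     if char in s1_dict:
--       s1_dict[char] += 1
--     else:
--       s1_dict[char] = 1
--   for char in s2:
--     if char in s2_dict:
--       s2_dict[char] += 1
--     else:
--       s2_dict[char] = 1
--   for k, v in s2_dict.items():
--     if s1_dict.get(k, 0) >= v:
--       continue
--     else:
--       return False
--   return True
-- ===== SOURCE B (Python) =====
-- def scramble_v2(s1, s2):
--   need = {}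
--   for ch in s2:
--     need[ch] = need.get(ch, 0) + 1
--   remaining = len(s2)
--   for ch in s1:
--     if need.get(ch, 0) > 0:
--       need[ch] = need[ch] - 1
--       remaining -= 1
--   return remaining == 0
-- ===== Notes on version B (the rewrite author's own statement) =====
-- stated objective: alternative
-- what changed: Only s2 is tabulated into a demand dict; s1 is scanned once consuming demand while a single remaining counter tracks outstanding need, instead of building two full frequency tables and comparing them key by key.
import Mathlib
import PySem

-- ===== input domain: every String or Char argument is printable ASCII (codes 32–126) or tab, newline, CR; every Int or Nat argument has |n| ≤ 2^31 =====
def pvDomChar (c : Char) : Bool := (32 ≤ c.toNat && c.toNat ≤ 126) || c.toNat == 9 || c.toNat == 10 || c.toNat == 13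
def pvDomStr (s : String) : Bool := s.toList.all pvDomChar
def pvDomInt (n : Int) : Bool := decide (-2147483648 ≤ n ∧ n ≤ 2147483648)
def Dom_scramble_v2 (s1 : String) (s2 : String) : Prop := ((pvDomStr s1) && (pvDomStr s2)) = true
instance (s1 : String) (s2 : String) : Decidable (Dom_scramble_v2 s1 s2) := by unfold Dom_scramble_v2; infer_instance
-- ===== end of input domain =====

-- B tabulates only s2 into a demand dict and consumes it in one pass over s1 with a remaining counter,
-- instead of A's two full frequency tables compared key by key (alternative decomposition, same cost).

-- ===== PORT A =====
def scramble_v2 (s1 : String) (s2 : String) : Bool :=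
  let s1_dict : PySem.Dict Char Int := s1.toList.foldl
    (fun d c => if d.contains c then d.insert c (d.getD c 0 + 1) else d.insert c 1)
    PySem.Dict.empty
  let s2_dict : PySem.Dict Char Int := s2.toList.foldl
    (fun d c => if d.contains c then d.insert c (d.getD c 0 + 1) else d.insert c 1)
    PySem.Dict.empty
  s2_dict.items.all (fun p => decide (s1_dict.getD p.1 0 ≥ p.2))

-- ===== PORT B =====
def scramble_v2_alt (s1 : String) (s2 : String) : Bool :=
  let need := s2.toList.foldl (fun d c => d.insert c (d.getD c 0 + 1)) PySem.Dict.empty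
  let st := s1.toList.foldl
    (fun (st : PySem.Dict Char Int × Int) c =>
      if st.1.getD c 0 > 0 then (st.1.insert c (st.1.getD c 0 - 1), st.2 - 1) else st)
    (need, PySem.Str.len s2)
  decide (st.2 = 0)

-- ===== PRECONDITION & SPEC =====
def Spec_scramble_v2 (s1 : String) (s2 : String) (out : Bool) : Prop := out = scramble_v2_alt s1 s2
instance (s1 : String) (s2 : String) (out : Bool) : Decidable (Spec_scramble_v2 s1 s2 out) := by unfold Spec_scramble_v2; infer_instance

-- ===== CLAIM (what is proved, stated in full; the proofs are below) =====
def Claim_equal_scramble_v2 : Prop := ∀ (s1 : String) (s2 : String), Dom_scramble_v2 s1 s2 → Spec_scramble_v2 s1 s2 (scramble_v2 s1 s2)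

-- ===== LEMMAS AND PROOFS =====

-- A's counting loop (branch on membership) builds exactly the counter dict.
lemma buildA_eq_counter (l : List Char) :
    l.foldl (fun d c => if d.contains c then d.insert c (d.getD c 0 + 1) else d.insert c 1)
      PySem.Dict.empty = PySem.Dict.counter l := by
  rw [PySem.List.foldl_congr_mem _ _ (fun d c => d.insert c (d.getD c 0 + 1)) _ ?_]
  · exact PySem.Dict.foldl_insert_getD_add_one_eq_counter l
  · intro d c _
    by_cases h : d.contains c = true
    · simp [h]
    · have h0 : d.getD c 0 = 0 :=
        PySem.Dict.getD_of_not_contains d 0 (by simpa using h)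
      simp [h, h0]

-- sum of getD over a nodup key list after one insert at a member key
lemma sum_getD_insert (K : List Char) (hnd : K.Nodup) (d : PySem.Dict Char Int)
    (a : Char) (ha : a ∈ K) (w : Int) :
    (K.map (fun c => (d.insert a w).getD c 0)).sum
      = (K.map (fun c => d.getD c 0)).sum + (w - d.getD a 0) := by
  induction K with
  | nil => cases ha
  | cons x K ih =>
    rcases List.nodup_cons.mp hnd with ⟨hx, hK⟩
    rcases List.mem_cons.mp ha with h | h
    · subst h
      have hc : ∀ c ∈ K, (d.insert a w).getD c 0 = d.getD c 0 := by
        intro c hcK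
        exact PySem.Dict.getD_insert_of_ne d w 0 (fun e => hx (e ▸ hcK))
      rw [List.map_cons, List.map_cons, List.sum_cons, List.sum_cons,
        PySem.Dict.getD_insert_self, List.map_congr_left hc]
      ring
    · have hxa : x ≠ a := fun e => hx (e ▸ h)
      rw [List.map_cons, List.map_cons, List.sum_cons, List.sum_cons,
        PySem.Dict.getD_insert_of_ne d w 0 hxa, ih hK h]
      ring

-- loop invariant for B's consuming pass: remaining + (initial demand sum) = r + (final demand sum)
lemma consume_snd (l : List Char) (K : List Char) (hnd : K.Nodup) :
    ∀ (d : PySem.Dict Char Int) (r : Int),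
    (∀ c, 0 < d.getD c 0 → c ∈ K) →
    (l.foldl (fun (st : PySem.Dict Char Int × Int) c =>
        if st.1.getD c 0 > 0 then (st.1.insert c (st.1.getD c 0 - 1), st.2 - 1) else st) (d, r)).2
      + (K.map (fun c => d.getD c 0)).sum
      = r + (K.map (fun c =>
          (l.foldl (fun (st : PySem.Dict Char Int × Int) c =>
            if st.1.getD c 0 > 0 then (st.1.insert c (st.1.getD c 0 - 1), st.2 - 1) else st)
            (d, r)).1.getD c 0)).sum := by
  induction l with
  | nil => intro d r _; simp
  | cons a l ih =>
    intro d r hK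
    by_cases h : 0 < d.getD a 0
    · have ha : a ∈ K := hK a h
      have hK' : ∀ c, 0 < (d.insert a (d.getD a 0 - 1)).getD c 0 → c ∈ K := by
        intro c hc
        by_cases e : c = a
        · exact e ▸ ha
        · exact hK c (by rwa [PySem.Dict.getD_insert_of_ne d _ 0 e] at hc)
      have := ih (d.insert a (d.getD a 0 - 1)) (r - 1) hK'
      simp only [List.foldl_cons, if_pos h] at this ⊢
      rw [sum_getD_insert K hnd d a ha (d.getD a 0 - 1)] at this
      omega
    · have := ih d r hK
      simp only [List.foldl_cons, if_neg h] at this ⊢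
      exact this

-- the demand dict after B's pass holds max (initial - consumed) 0 at every key
lemma consume_fst (l : List Char) :
    ∀ (d : PySem.Dict Char Int) (r : Int),
    (∀ c, 0 ≤ d.getD c 0) →
    ∀ c, (l.foldl (fun (st : PySem.Dict Char Int × Int) c =>
        if st.1.getD c 0 > 0 then (st.1.insert c (st.1.getD c 0 - 1), st.2 - 1) else st)
        (d, r)).1.getD c 0 = max (d.getD c 0 - l.count c) 0 := by
  induction l with
  | nil =>
    intro d r hd c
    simp only [List.foldl_nil, List.count_nil, Nat.cast_zero, sub_zero]
    exact (max_eq_left (hd c)).symm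
  | cons a l ih =>
    intro d r hd c
    by_cases h : 0 < d.getD a 0
    · have hd' : ∀ c', 0 ≤ (d.insert a (d.getD a 0 - 1)).getD c' 0 := by
        intro c'
        by_cases e : c' = a
        · subst e; rw [PySem.Dict.getD_insert_self]; omega
        · rw [PySem.Dict.getD_insert_of_ne d _ 0 e]; exact hd c'
      simp only [List.foldl_cons, if_pos h, ih _ (r - 1) hd' c]
      by_cases e : c = a
      · subst e
        rw [PySem.Dict.getD_insert_self, List.count_cons_self]
        congr 1
        push_cast
        ring
      · rw [PySem.Dict.getD_insert_of_ne d _ 0 e,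
          List.count_cons_of_ne (Ne.symm e)]
    · simp only [List.foldl_cons, if_neg h, ih d r hd c]
      by_cases e : c = a
      · subst e
        have hv : d.getD c 0 = 0 := le_antisymm (by omega) (hd c)
        rw [hv, List.count_cons_self,
          max_eq_right (by omega : (0:Int) - (l.count c : Int) ≤ 0),
          max_eq_right (by omega : (0:Int) - ((l.count c + 1 : Nat) : Int) ≤ 0)]
      · rw [List.count_cons_of_ne (Ne.symm e)]

lemma sum_eq_zero_iff_int (l : List Int) (h : ∀ x ∈ l, 0 ≤ x) :
    l.sum = 0 ↔ ∀ x ∈ l, x = 0 := by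
  induction l with
  | nil => simp
  | cons a l ih =>
    have ha := h a (List.mem_cons_self ..)
    have hl : ∀ x ∈ l, 0 ≤ x := fun x hx => h x (List.mem_cons_of_mem _ hx)
    have hs : 0 ≤ l.sum := List.sum_nonneg hl
    constructor
    · intro hz
      have h1 : a = 0 ∧ l.sum = 0 := by simp at hz; omega
      intro x hx
      rcases List.mem_cons.mp hx with e | e
      · exact e ▸ h1.1
      · exact (ih hl).mp h1.2 x e
    · intro hz
      simp only [List.sum_cons, hz a (List.mem_cons_self ..), zero_add]
      exact (ih hl).mpr (fun x hx => hz x (List.mem_cons_of_mem _ hx))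

-- the total demand of s2 equals its length
lemma sum_count_ofList (l : List Char) :
    ((PySem.Set.ofList l).map (fun c => (l.count c : Int))).sum = (l.length : Int) := by
  have hperm : List.Perm (PySem.Set.ofList l) l.dedup :=
    (List.perm_ext_iff_of_nodup (PySem.Set.nodup_ofList l) l.nodup_dedup).mpr
      (fun a => by rw [PySem.Set.mem_ofList, List.mem_dedup])
  rw [(hperm.map (fun c => (l.count c : Int))).sum_eq]
  rw [show (fun c => (l.count c : Int)) = (fun n : Nat => (n : Int)) ∘ (fun c => l.count c) from rfl,
    ← List.map_map, ← Nat.cast_list_sum, List.sum_map_count_dedup_eq_length]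

-- both programs decide '∀ c ∈ s2, count(s2,c) ≤ count(s1,c)'
lemma main_eq (s1 s2 : String) : scramble_v2 s1 s2 = scramble_v2_alt s1 s2 := by
  simp only [scramble_v2, scramble_v2_alt]
  rw [PySem.Dict.foldl_insert_getD_add_one_eq_counter]
  simp only [buildA_eq_counter]
  have hd : ∀ c, 0 ≤ (PySem.Dict.counter s2.toList).getD c 0 := by
    intro c; rw [PySem.Dict.getD_counter]; exact Int.natCast_nonneg _
  have hK : ∀ c, 0 < (PySem.Dict.counter s2.toList).getD c 0 → c ∈ (PySem.Set.ofList s2.toList) := by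
    intro c hc
    rw [PySem.Dict.getD_counter] at hc
    rw [PySem.Set.mem_ofList]
    exact List.count_pos_iff.mp (by exact_mod_cast hc)
  have hsnd := consume_snd s1.toList (PySem.Set.ofList s2.toList)
    (PySem.Set.nodup_ofList s2.toList) (PySem.Dict.counter s2.toList) (PySem.Str.len s2) hK
  have hfst := consume_fst s1.toList (PySem.Dict.counter s2.toList) (PySem.Str.len s2) hd
  set st := s1.toList.foldl
    (fun (st : PySem.Dict Char Int × Int) c =>
      if st.1.getD c 0 > 0 then (st.1.insert c (st.1.getD c 0 - 1), st.2 - 1) else st)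
    (PySem.Dict.counter s2.toList, PySem.Str.len s2) with hst
  -- remaining = sum of the residual demands
  have hsum0 : ((PySem.Set.ofList s2.toList).map
      (fun c => (PySem.Dict.counter s2.toList).getD c 0)).sum = (s2.toList.length : Int) := by
    rw [List.map_congr_left (fun c _ => PySem.Dict.getD_counter s2.toList c),
      sum_count_ofList]
  have hrem : st.2 = ((PySem.Set.ofList s2.toList).map
      (fun c => st.1.getD c 0)).sum := by
    rw [hsum0, PySem.Str.len_eq] at hsnd
    omega
  have hres : ∀ c ∈ (PySem.Set.ofList s2.toList),
      st.1.getD c 0 = max ((s2.toList.count c : Int) - s1.toList.count c) 0 := by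
    intro c _
    rw [hfst c, PySem.Dict.getD_counter]
  have hnonneg : ∀ x ∈ (PySem.Set.ofList s2.toList).map (fun c => st.1.getD c 0), 0 ≤ x := by
    intro x hx
    rcases List.mem_map.mp hx with ⟨c, hc, rfl⟩
    rw [hres c hc]; exact le_max_right _ _
  rw [PySem.Dict.items_counter]
  rw [Bool.eq_iff_iff, List.all_eq_true, decide_eq_true_iff, hrem,
    sum_eq_zero_iff_int _ hnonneg]
  constructor
  · intro h x hx
    rcases List.mem_map.mp hx with ⟨c, hc, rfl⟩
    have := h (c, (s2.toList.count c : Int)) (List.mem_map.mpr ⟨c, hc, rfl⟩)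
    simp only [decide_eq_true_iff, ge_iff_le] at this
    rw [PySem.Dict.getD_counter] at this
    rw [hres c hc]
    exact max_eq_right (by omega)
  · intro h p hp
    rcases List.mem_map.mp hp with ⟨c, hc, rfl⟩
    have := h (st.1.getD c 0) (List.mem_map.mpr ⟨c, hc, rfl⟩)
    rw [hres c hc] at this
    have hle := le_max_left ((s2.toList.count c : Int) - s1.toList.count c) 0
    rw [this] at hle
    simp only [ge_iff_le, decide_eq_true_iff, PySem.Dict.getD_counter]
    omega

-- ===== VERDICT (by name: the statement is the Claim_ definition above) =====
theorem scramble_v2_spec : Claim_equal_scramble_v2 := by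
  intro s1 s2 _
  exact main_eq s1 s2
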